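-- pv_equiv track=rewrite | github.com/andreakiro/cil-lab | models/neurals/arch/deeprec/src/data/converter.py | convert2CILdictionary
-- ===== SOURCE A (Python) =====
-- def convert2CILdictionary(dictionary):
--     """
--     Converts dictionary to newdictionary with items as keys, (user, rating) tuples as values.
--     Sorts the items and for each item sorts the (user, rating) tuples by user.
--     @param dictionary: dictionary with users as keys, (item, rating) tuples as values.
--     """
--     newdictionary = dict()
--     for user in dictionary:
--         for item, rating in dictionary[user]:
--             if item not in newdictionary:
--                 newdictionary[item] = []
--             newdictionary[item].append((user, rating))
--
--     # sort by item, then by user, as in the original csv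
--     for item in newdictionary:
--         newdictionary[item] = sorted(newdictionary[item])
--     return dict(sorted(newdictionary.items()))
-- ===== SOURCE B (Python) =====
-- def convert2CILdictionary(dictionary):
--     # Flatten to (item, user, rating) triples, sort once (tuple order = item,
--     # then user, then rating), then group consecutive runs of equal items.
--     triples = sorted((item, user, rating)
--                      for user, pairs in dictionary.items()
--                      for item, rating in pairs)
--     groups = []
--     i, n = 0, len(triples)
--     while i < n:
--         item = triples[i][0]
--         bucket = []
--         while i < n and triples[i][0] == item:
--             bucket.append((triples[i][1], triples[i][2]))
--             i += 1
--         groups.append((item, bucket))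
--     return dict(groups)
-- ===== Notes on version B (the rewrite author's own statement) =====
-- stated objective: alternative
-- what changed: Instead of building an item-keyed dict in traversal order and then sorting every bucket and the key list separately, B flattens the input to (item,user,rating) triples, sorts that flat list once, and emits the result by grouping consecutive runs of equal items.
import Mathlib
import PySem

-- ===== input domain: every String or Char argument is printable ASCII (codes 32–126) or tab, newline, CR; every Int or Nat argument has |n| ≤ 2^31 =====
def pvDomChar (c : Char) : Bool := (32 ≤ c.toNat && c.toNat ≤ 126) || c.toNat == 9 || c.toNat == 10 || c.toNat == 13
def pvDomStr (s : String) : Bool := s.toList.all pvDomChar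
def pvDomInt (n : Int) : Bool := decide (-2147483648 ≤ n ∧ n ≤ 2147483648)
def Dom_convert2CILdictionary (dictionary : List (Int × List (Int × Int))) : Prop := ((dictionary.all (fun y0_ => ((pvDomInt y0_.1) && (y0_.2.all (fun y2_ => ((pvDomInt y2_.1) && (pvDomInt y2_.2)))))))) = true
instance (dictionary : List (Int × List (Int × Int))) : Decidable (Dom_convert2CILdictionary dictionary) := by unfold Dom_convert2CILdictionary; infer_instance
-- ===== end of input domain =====

-- B inverts the user-dict by one flat sort of (item,user,rating) triples and a single
-- run-grouping pass, instead of A's dict build + per-bucket sorts + key sort (alternative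
-- decomposition, same asymptotic cost). Return-value equivalence.

-- ===== PORT A =====
def convert2CILdictionary (dictionary : List (Int × List (Int × Int))) : List (Int × List (Int × Int)) :=
  -- for user in dictionary: for item, rating in dictionary[user]: …
  -- ('dictionary[user]' is the first-match lookup; the default [] is unreachable, the key
  -- comes from the list itself)
  let newd : PySem.Dict Int (List (Int × Int)) :=
    dictionary.foldl (fun nd p =>
      ((PySem.Dict.mk dictionary).getD p.1 []).foldl (fun nd q =>
        let nd1 := if nd.contains q.1 then nd else nd.insert q.1 []
        nd1.modify q.1 [] (fun l => l ++ [(p.1, q.2)])) nd)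
      PySem.Dict.empty
  -- for item in newd: newd[item] = sorted(newd[item])
  -- (Python's order on the (user, rating) tuples is the lexicographic pair order, = toLex)
  let sortedVals : List (Int × List (Int × Int)) :=
    newd.items.map (fun p => (p.1, PySem.List.sorted p.2 (fun q => toLex q) false))
  -- dict(sorted(newdictionary.items())): the keys are distinct, so Python's comparison of
  -- the (item, value-list) pairs is decided by the item alone — exact here
  (PySem.Dict.ofList (PySem.List.sorted sortedVals (fun p => p.1) false)).items

-- ===== PORT B =====
-- the outer while loop of Source B: take the run of the leading item, recurse on the rest
def pvGroupRuns : List (Int × Int × Int) → List (Int × List (Int × Int))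
  | [] => []
  | t :: rest =>
    (t.1, (t :: rest.takeWhile (fun s => s.1 == t.1)).map (fun s => s.2)) ::
      pvGroupRuns (rest.dropWhile (fun s => s.1 == t.1))
termination_by l => l.length
decreasing_by
  simp only [List.length_cons]
  exact Nat.lt_succ_of_le (List.length_dropWhile_le _ _)

def convert2CILdictionary_alt (dictionary : List (Int × List (Int × Int))) : List (Int × List (Int × Int)) :=
  let triples : List (Int × Int × Int) :=
    dictionary.flatMap (fun p => p.2.map (fun q => (q.1, p.1, q.2)))
  -- sorted(triples): Python's 3-tuple order is the lexicographic order, = nested toLex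
  let s := PySem.List.sorted triples (fun t => toLex (t.1, toLex t.2)) false
  (PySem.Dict.ofList (pvGroupRuns s)).items

-- ===== PRECONDITION & SPEC =====
-- Pre_ excludes association lists with duplicate user keys: those do not denote a Python
-- dict (the dict literal collapses them before either function runs).
def Pre_convert2CILdictionary (dictionary : List (Int × List (Int × Int))) : Prop :=
  (dictionary.map Prod.fst).Nodup
instance (dictionary : List (Int × List (Int × Int))) : Decidable (Pre_convert2CILdictionary dictionary) := by unfold Pre_convert2CILdictionary; infer_instance

def pvWitness_convert2CILdictionary : (List (Int × List (Int × Int))) :=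
  [(1, [(10, 5), (7, 2)]), (2, [(10, 3)])]

def Spec_convert2CILdictionary (dictionary : List (Int × List (Int × Int))) (out : List (Int × List (Int × Int))) : Prop := out = convert2CILdictionary_alt dictionary
instance (dictionary : List (Int × List (Int × Int))) (out : List (Int × List (Int × Int))) : Decidable (Spec_convert2CILdictionary dictionary out) := by unfold Spec_convert2CILdictionary; infer_instance

-- ===== CLAIM (what is proved, stated in full; the proofs are below) =====
def Claim_equal_convert2CILdictionary : Prop := ∀ (dictionary : List (Int × List (Int × Int))), Dom_convert2CILdictionary dictionary → Pre_convert2CILdictionary dictionary → Spec_convert2CILdictionary dictionary (convert2CILdictionary dictionary)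

-- ===== LEMMAS AND PROOFS =====

-- the flattened traversal-order triple list both ports are about
def pvTri (dictionary : List (Int × List (Int × Int))) : List (Int × Int × Int) :=
  dictionary.flatMap (fun p => p.2.map (fun q => (q.1, p.1, q.2)))

-- the lexicographic triple key of B's single sort
def pvKey3 (t : Int × Int × Int) : Lex (Int × Lex (Int × Int)) := toLex (t.1, toLex t.2)

-- the per-triple step of A's build loop, with the contains-test absorbed into modify
lemma pvStep_eq (nd : PySem.Dict Int (List (Int × Int))) (k : Int) (pr : Int × Int) :
    (if nd.contains k then nd else nd.insert k []).modify k [] (fun l => l ++ [pr])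
      = nd.modify k [] (fun l => l ++ [pr]) := by
  by_cases h : nd.contains k
  · simp [h]
  · simp only [h, if_neg, Bool.not_eq_true]
    simp only [PySem.Dict.modify, PySem.Dict.getD_insert_self,
      PySem.Dict.insert_insert_self,
      PySem.Dict.getD_of_not_contains _ _ (by simpa using h)]

-- A's build loop over the dict equals the flat modify-loop over pvTri
lemma pvBuild_eq (dictionary : List (Int × List (Int × Int)))
    (hpre : (dictionary.map Prod.fst).Nodup) :
    dictionary.foldl (fun nd p =>
      ((PySem.Dict.mk dictionary).getD p.1 []).foldl (fun nd q =>
        let nd1 := if nd.contains q.1 then nd else nd.insert q.1 []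
        nd1.modify q.1 [] (fun l => l ++ [(p.1, q.2)])) nd)
      PySem.Dict.empty
    = (pvTri dictionary).foldl
        (fun nd t => nd.modify t.1 [] (fun l => l ++ [t.2])) PySem.Dict.empty := by
  unfold pvTri
  rw [List.foldl_flatMap]
  apply PySem.List.foldl_congr_mem
  intro acc p hp
  have hlook : (PySem.Dict.mk dictionary).getD p.1 [] = p.2 := by
    apply PySem.Dict.getD_of_mem_items
    · exact hp
    · simpa [PySem.Dict.keys] using hpre
  rw [hlook, List.foldl_map]
  apply PySem.List.foldl_congr_mem
  intro acc' q _
  exact pvStep_eq acc' q.1 (p.1, q.2)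

-- dedup is a sublist (so Pairwise facts transfer)
lemma pvDedup_sublist {α : Type} [BEq α] [LawfulBEq α] (l : List α) :
    (PySem.List.dedup l).Sublist l := by
  simp only [PySem.List.dedup_eq_ofList]
  induction l using List.reverseRecOn with
  | nil => simp [PySem.Set.ofList]
  | append_singleton l x ih =>
    have : PySem.Set.ofList (l ++ [x]) = PySem.Set.add (PySem.Set.ofList l) x := by
      simp [PySem.Set.ofList, List.foldl_append]
    rw [this, PySem.Set.add]
    split
    · exact ih.trans (List.sublist_append_left l [x])
    · exact ih.append (List.Sublist.refl [x])

-- Set.update with an accumulator disjoint from the list is an append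
lemma pvUpdate_disjoint {α : Type} [BEq α] [LawfulBEq α] (l : List α) (acc s : List α)
    (h : ∀ y ∈ l, y ∉ acc) :
    PySem.Set.update (acc ++ s) l = acc ++ PySem.Set.update s l := by
  induction l generalizing s with
  | nil => simp [PySem.Set.update]
  | cons x l ih =>
    have hx : x ∉ acc := h x (by simp)
    have h' : ∀ y ∈ l, y ∉ acc := fun y hy => h y (by simp [hy])
    simp only [PySem.Set.update, List.foldl_cons]
    by_cases hs : x ∈ s
    · have h1 : PySem.Set.add (acc ++ s) x = acc ++ s := by
        simp [PySem.Set.add, PySem.Set.contains, List.contains_eq_mem, hs]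
      have h2 : PySem.Set.add s x = s := by
        simp [PySem.Set.add, PySem.Set.contains, List.contains_eq_mem, hs]
      rw [h1, h2]; exact ih s h'
    · have h1 : PySem.Set.add (acc ++ s) x = acc ++ (s ++ [x]) := by
        simp [PySem.Set.add, PySem.Set.contains, List.contains_eq_mem, hs, hx]
      have h2 : PySem.Set.add s x = s ++ [x] := by
        simp [PySem.Set.add, PySem.Set.contains, List.contains_eq_mem, hs]
      rw [h1, h2]; exact ih (s ++ [x]) h'

lemma pvUpdate_of_subset {α : Type} [BEq α] [LawfulBEq α] (l s : List α)
    (h : ∀ y ∈ l, y ∈ s) : PySem.Set.update s l = s := by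
  induction l with
  | nil => simp [PySem.Set.update]
  | cons x l ih =>
    have hx : x ∈ s := h x (by simp)
    simp only [PySem.Set.update, List.foldl_cons]
    have h1 : PySem.Set.add s x = s := by
      simp [PySem.Set.add, PySem.Set.contains, List.contains_eq_mem, hx]
    rw [h1]
    exact ih (fun y hy => h y (by simp [hy]))

-- grouping a Pairwise-≤-keyed list is: dedup of the keys, each with its filtered bucket
lemma pvGroupRuns_eq (S : List (Int × Int × Int))
    (h : S.Pairwise (fun a b => a.1 ≤ b.1)) :
    pvGroupRuns S = (PySem.List.dedup (S.map (fun t => t.1))).map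
      (fun k => (k, (S.filter (fun t => t.1 == k)).map (fun t => t.2))) := by
  induction S using pvGroupRuns.induct with
  | case1 => simp [pvGroupRuns, PySem.List.dedup_eq_ofList, PySem.Set.ofList]
  | case2 t rest ih =>
    have hpair := h
    rw [List.pairwise_cons] at hpair
    obtain ⟨hle, hrest⟩ := hpair
    set run := rest.takeWhile (fun s => s.1 == t.1) with hrundef
    set rest' := rest.dropWhile (fun s => s.1 == t.1) with hrestdef
    have hsplit : run ++ rest' = rest := List.takeWhile_append_dropWhile
    have hrun : ∀ s ∈ run, s.1 = t.1 := by
      intro s hs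
      have := List.mem_takeWhile_imp hs
      simpa using this
    have hrest' : rest'.Pairwise (fun a b => a.1 ≤ b.1) :=
      List.Pairwise.sublist (List.dropWhile_sublist _) hrest
    have hgt : ∀ e ∈ rest', t.1 < e.1 := by
      cases hr : rest' with
      | nil => intro e he; simp at he
      | cons hd tl =>
        have hhd : ¬ (hd.1 == t.1) = true := by
          have := List.head?_dropWhile_not (fun s => s.1 == t.1) rest
          rw [← hrestdef, hr] at this
          simp only [List.head?_cons] at this
          simp [this]
        have hhd' : t.1 < hd.1 := by
          have hmem : hd ∈ rest := by
            have : hd ∈ rest' := by rw [hr]; simp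
            exact (List.dropWhile_sublist _).mem this
          have := hle hd hmem
          rcases lt_or_eq_of_le this with h' | h'
          · exact h'
          · exact absurd (by simpa using h'.symm) hhd
        intro e he
        rcases List.mem_cons.mp he with rfl | he'
        · exact hhd'
        · have : hd.1 ≤ e.1 := by
            rw [hr] at hrest'
            exact (List.pairwise_cons.mp hrest').1 e he'
          exact lt_of_lt_of_le hhd' this
    have hne : ∀ e ∈ rest', ¬ e.1 = t.1 := fun e he => ne_of_gt (hgt e he)
    -- dedup of the keys splits off t.1
    have hkeys : PySem.List.dedup ((t :: rest).map (fun t => t.1))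
        = t.1 :: PySem.List.dedup (rest'.map (fun t => t.1)) := by
      simp only [PySem.List.dedup_eq_ofList]
      have hmap : (t :: rest).map (fun t => t.1)
          = t.1 :: (run.map (fun t => t.1) ++ rest'.map (fun t => t.1)) := by
        simp [← hsplit]
      rw [hmap]
      have h0 : PySem.Set.ofList (t.1 :: (run.map (fun t => t.1) ++ rest'.map (fun t => t.1)))
          = PySem.Set.update (PySem.Set.update [t.1] (run.map (fun t => t.1))) (rest'.map (fun t => t.1)) := by
        simp [PySem.Set.ofList, PySem.Set.update, List.foldl_append, PySem.Set.add,
          PySem.Set.contains, PySem.Set.empty]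
      rw [h0]
      have h1 : PySem.Set.update [t.1] (run.map (fun t => t.1)) = [t.1] := by
        apply pvUpdate_of_subset
        intro y hy
        rcases List.mem_map.mp hy with ⟨s, hs, rfl⟩
        simp [hrun s hs]
      rw [h1]
      have h2 : PySem.Set.update ([t.1] ++ ([] : List Int)) (rest'.map (fun t => t.1))
          = [t.1] ++ PySem.Set.update [] (rest'.map (fun t => t.1)) := by
        apply pvUpdate_disjoint
        intro y hy
        rcases List.mem_map.mp hy with ⟨s, hs, rfl⟩
        simp [hne s hs]
      simp only [List.append_nil] at h2
      rw [h2]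
      rfl
    -- the bucket of t.1 is t :: run; every other bucket lives in rest'
    have hfilt_t : (t :: rest).filter (fun s => s.1 == t.1) = t :: run := by
      have : rest.filter (fun s => s.1 == t.1) = run := by
        rw [← hsplit, List.filter_append]
        have e1 : run.filter (fun s => s.1 == t.1) = run :=
          List.filter_eq_self.mpr (fun s hs => by simp [hrun s hs])
        have e2 : rest'.filter (fun s => s.1 == t.1) = [] :=
          List.filter_eq_nil_iff.mpr (fun s hs => by simp [hne s hs])
        rw [e1, e2, List.append_nil]
      simp [this]
    have hfilt_k : ∀ k ∈ PySem.List.dedup (rest'.map (fun t => t.1)),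
        (t :: rest).filter (fun s => s.1 == k) = rest'.filter (fun s => s.1 == k) := by
      intro k hk
      have hkmem : k ∈ rest'.map (fun t => t.1) := by
        simpa [PySem.List.mem_dedup] using hk
      rcases List.mem_map.mp hkmem with ⟨s, hs, rfl⟩
      have hkne : ¬ t.1 = s.1 := fun hh => hne s hs (hh.symm)
      rw [← hsplit]
      simp only [List.filter_cons, List.filter_append]
      have e1 : run.filter (fun x => x.1 == s.1) = [] :=
        List.filter_eq_nil_iff.mpr (fun x hx => by simp [hrun x hx]; exact fun hh => hkne hh)
      rw [e1]
      simp [hkne]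
    -- assemble
    rw [hkeys]
    simp only [List.map_cons]
    have hIH := ih hrest'
    rw [show pvGroupRuns (t :: rest)
        = (t.1, (t :: run).map (fun s => s.2)) :: pvGroupRuns rest' by
      rw [pvGroupRuns]]
    congr 1
    · rw [hfilt_t]
    · rw [hIH]
      apply List.map_congr_left
      intro k hk
      rw [hfilt_k k hk]

-- sorting A's traversal-order bucket gives B's grouped bucket
lemma pvBucket_eq (tri : List (Int × Int × Int)) (k : Int) :
    PySem.List.sorted
        ((tri.filter (fun t => t.1 == k)).map (fun t => t.2)) (fun q => toLex q) false
      = ((PySem.List.sorted tri pvKey3 false).filter (fun t => t.1 == k)).map (fun t => t.2) := by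
  have hpermS : (PySem.List.sorted tri pvKey3 false).Perm tri :=
    PySem.List.sorted_perm tri pvKey3 false
  have hp : ((PySem.List.sorted tri pvKey3 false).filter (fun t => t.1 == k)).Pairwise
      (fun a b => pvKey3 a ≤ pvKey3 b) :=
    (PySem.List.sorted_pairwise tri pvKey3).filter (fun t => t.1 == k)
  apply PySem.List.eq_of_perm_of_pairwise_le_of_injective (fun q : Int × Int => toLex q)
    toLex.injective
  · exact (PySem.List.sorted_perm _ _ _).trans ((hpermS.filter _).map _).symm
  · exact PySem.List.sorted_pairwise _ (fun q => toLex q)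
  · apply List.pairwise_map.mpr
    refine List.Pairwise.imp_of_mem ?_ hp
    intro a b ha hb hab
    have hak : a.1 = k := by simpa using List.of_mem_filter ha
    have hbk : b.1 = k := by simpa using List.of_mem_filter hb
    unfold pvKey3 at hab
    rcases Prod.Lex.le_iff.mp hab with h' | h'
    · exfalso; simp only [ofLex_toLex] at h'; omega
    · simpa using h'.2

theorem convert2CILdictionary_spec : Claim_equal_convert2CILdictionary := by
  intro dictionary _ hpre
  unfold Spec_convert2CILdictionary
  unfold convert2CILdictionary convert2CILdictionary_alt
  simp only []
  rw [pvBuild_eq dictionary hpre]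
  set tri := pvTri dictionary with htri
  set D := tri.foldl (fun nd t => nd.modify t.1 [] (fun l => l ++ [t.2])) PySem.Dict.empty with hD
  -- characterize A's dict
  have hkeys : D.keys = PySem.List.dedup (tri.map (fun t => t.1)) := by
    rw [hD, PySem.Dict.keys_foldl_modify_key tri (fun t => t.1) [] (fun _ t v => v ++ [t.2])]
    simp [PySem.List.dedup_eq_ofList, PySem.Set.ofList, PySem.Set.update, PySem.Dict.keys,
      PySem.Dict.empty]
  have hnodup : D.keys.Nodup := by
    rw [hkeys]; exact PySem.List.nodup_dedup _
  have hgetD : ∀ k, D.getD k [] = (tri.filter (fun t => t.1 == k)).map (fun t => t.2) := by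
    intro k
    rw [hD]
    simpa using PySem.Dict.getD_foldl_modify_append tri PySem.Dict.empty k
  have hitems : D.items = (PySem.List.dedup (tri.map (fun t => t.1))).map
      (fun k => (k, (tri.filter (fun t => t.1 == k)).map (fun t => t.2))) := by
    rw [PySem.Dict.items_eq_map_keys D hnodup [], hkeys]
    apply List.map_congr_left
    intro k _
    rw [hgetD k]
  -- B's side
  set S := PySem.List.sorted tri (fun t => toLex (t.1, toLex t.2)) false with hSdef
  have hSkey : S = PySem.List.sorted tri pvKey3 false := by rw [hSdef]; rfl
  have hfst : S.Pairwise (fun a b => a.1 ≤ b.1) := by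
    rw [hSkey]
    have := PySem.List.sorted_pairwise tri pvKey3
    refine this.imp ?_
    intro a b hab
    unfold pvKey3 at hab
    rcases Prod.Lex.le_iff.mp hab with h' | h'
    · simp only [ofLex_toLex] at h'; omega
    · simp only [ofLex_toLex] at h'; omega
  have hgroup := pvGroupRuns_eq S hfst
  -- key lists
  have hpermS : S.Perm tri := by rw [hSkey]; exact PySem.List.sorted_perm _ _ _
  have hkperm : (PySem.List.dedup (S.map (fun t => t.1))).Perm
      (PySem.List.dedup (tri.map (fun t => t.1))) := by
    rw [List.perm_ext_iff_of_nodup (PySem.List.nodup_dedup _) (PySem.List.nodup_dedup _)]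
    intro a
    simp only [PySem.List.mem_dedup]
    exact ⟨fun ha => (hpermS.map (fun t => t.1)).mem_iff.mp ha,
           fun ha => (hpermS.map (fun t => t.1)).mem_iff.mpr ha⟩
  have hksle : (S.map (fun t => t.1)).Pairwise (fun a b => a ≤ b) :=
    List.pairwise_map.mpr hfst
  have hkslt : (PySem.List.dedup (S.map (fun t => t.1))).Pairwise (fun a b => a < b) := by
    have h1 : (PySem.List.dedup (S.map (fun t => t.1))).Pairwise (fun a b => a ≤ b) :=
      List.Pairwise.sublist (pvDedup_sublist _) hksle
    have h2 : (PySem.List.dedup (S.map (fun t => t.1))).Nodup := PySem.List.nodup_dedup _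
    exact (h1.and h2).imp (fun h => lt_of_le_of_ne h.1 h.2)
  -- equality of the two item lists before the final dict()
  have hmain : PySem.List.sorted
      (D.items.map (fun p => (p.1, PySem.List.sorted p.2 (fun q => toLex q) false)))
      (fun p => p.1) false
      = pvGroupRuns S := by
    rw [hgroup]
    apply PySem.List.sorted_eq_of_perm_of_pairwise_lt
    · -- permutation
      rw [hitems, List.map_map]
      have hfuneq : ∀ k, (k, (S.filter (fun t => t.1 == k)).map (fun t => t.2))
          = ((fun p : Int × List (Int × Int) =>
                (p.1, PySem.List.sorted p.2 (fun q => toLex q) false)) ∘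
             (fun k => (k, (tri.filter (fun t => t.1 == k)).map (fun t => t.2)))) k := by
        intro k
        have hb := pvBucket_eq tri k
        rw [← hSkey] at hb
        simp only [Function.comp]
        rw [← hb]
      have e1 : (PySem.List.dedup (S.map (fun t => t.1))).map
            (fun k => (k, (S.filter (fun t => t.1 == k)).map (fun t => t.2)))
          = (PySem.List.dedup (S.map (fun t => t.1))).map
            ((fun p : Int × List (Int × Int) =>
                (p.1, PySem.List.sorted p.2 (fun q => toLex q) false)) ∘
             (fun k => (k, (tri.filter (fun t => t.1 == k)).map (fun t => t.2)))) :=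
        List.map_congr_left (fun k _ => hfuneq k)
      rw [e1]
      exact hkperm.map _
    · -- strictly increasing keys
      exact List.pairwise_map.mpr hkslt
  rw [hmain]
  rfl
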